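-- pv_equiv track=rewrite | github.com/openpaul/pycook | pycook/utils.py | group_steplines
-- ===== SOURCE A (Python) =====
-- from typing import Generator, Union
--
-- def is_comment_line(line: str) -> bool:
--     return line.strip().startswith("-- ")
--
-- def is_metadata_line(line: str) -> bool:
--     return line.strip().startswith(">> ")
--
-- def group_steplines(cooklang_text: list[str]) -> Generator[list[str], None, None]:
--     steptext = []
--     for line in cooklang_text:
--         line = line.strip()
--         if is_comment_line(line) or is_metadata_line(line):
--             continue
--         elif line != "":
--             steptext.append(line)
--
--         if line == "" and len(steptext) > 0:
--             yield steptext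
--             steptext = []
--
--     if len(steptext) > 0:
--         yield steptext
-- ===== SOURCE B (Python) =====
-- from itertools import groupby
--
-- def is_comment_line(line: str) -> bool:
--     return line.strip().startswith("-- ")
--
-- def is_metadata_line(line: str) -> bool:
--     return line.strip().startswith(">> ")
--
-- def group_steplines(cooklang_text):
--     stripped = (line.strip() for line in cooklang_text)
--     kept = (l for l in stripped if not (is_comment_line(l) or is_metadata_line(l)))
--     for empty, grp in groupby(kept, key=lambda l: l == ""):
--         if not empty:
--             yield list(grp)
-- ===== Notes on version B (the rewrite author's own statement) =====
-- stated objective: idiomatic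
-- what changed: Replaces the accumulator/flush state machine with a filter-then-group pipeline: strip, drop comment/metadata lines, then itertools.groupby on emptiness and yield the non-empty runs.
import Mathlib
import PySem

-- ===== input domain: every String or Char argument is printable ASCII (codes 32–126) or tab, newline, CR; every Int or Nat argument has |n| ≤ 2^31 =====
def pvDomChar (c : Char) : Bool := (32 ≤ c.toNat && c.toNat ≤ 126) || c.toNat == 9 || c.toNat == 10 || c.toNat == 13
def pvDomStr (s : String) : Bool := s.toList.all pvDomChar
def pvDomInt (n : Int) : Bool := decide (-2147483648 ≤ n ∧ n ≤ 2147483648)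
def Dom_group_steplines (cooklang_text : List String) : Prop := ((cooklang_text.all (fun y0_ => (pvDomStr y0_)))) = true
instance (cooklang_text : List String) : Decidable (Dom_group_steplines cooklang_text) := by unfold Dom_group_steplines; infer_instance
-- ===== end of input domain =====

-- B replaces A's accumulator/flush state machine by a filter-then-group pipeline (same O(n) cost, no state machine).
-- ===== PORT A =====
def pvIsCommentLine (line : String) : Bool := PySem.Str.startswith (PySem.Str.strip line) "-- "

def pvIsMetadataLine (line : String) : Bool := PySem.Str.startswith (PySem.Str.strip line) ">> "

-- the generator loop of A: state = pending steptext, output = list of yielded blocks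
def pvLoopA : List String → List String → List (List String)
  | [], steptext => if steptext.length > 0 then [steptext] else []
  | l :: rest, steptext =>
    let line := PySem.Str.strip l
    if pvIsCommentLine line || pvIsMetadataLine line then pvLoopA rest steptext
    else if line ≠ "" then
      -- appended; line ≠ "" so the flush check below does not fire
      pvLoopA rest (steptext ++ [line])
    else if steptext.length > 0 then steptext :: pvLoopA rest []
    else pvLoopA rest steptext

def group_steplines (cooklang_text : List String) : List (List String) :=
  pvLoopA cooklang_text []

-- ===== PORT B =====
-- itertools.groupby(kept, key = λ l => l == ""), yielding the groups whose key is false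
def pvGroupRuns : List String → List (List String)
  | [] => []
  | l :: rest =>
    if l = "" then pvGroupRuns rest
    else (l :: rest.takeWhile (· ≠ "")) :: pvGroupRuns (rest.dropWhile (· ≠ ""))
termination_by ys => ys.length
decreasing_by
  · simp
  · exact Nat.lt_succ_of_le (List.length_dropWhile_le _ _)

def group_steplines_alt (cooklang_text : List String) : List (List String) :=
  pvGroupRuns (((cooklang_text.map PySem.Str.strip)).filter
    (fun l => !(pvIsCommentLine l || pvIsMetadataLine l)))

-- ===== PRECONDITION & SPEC =====
def Spec_group_steplines (cooklang_text : List String) (out : List (List String)) : Prop := out = group_steplines_alt cooklang_text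
instance (cooklang_text : List String) (out : List (List String)) : Decidable (Spec_group_steplines cooklang_text out) := by unfold Spec_group_steplines; infer_instance

-- ===== CLAIM (what is proved, stated in full; the proofs are below) =====
def Claim_equal_group_steplines : Prop := ∀ (cooklang_text : List String), Dom_group_steplines cooklang_text → Spec_group_steplines cooklang_text (group_steplines cooklang_text)

-- ===== LEMMAS AND PROOFS =====

-- ===== VERDICT (by name: the statement is the Claim_ definition above) =====
-- A's loop with pending block st, run on the already-filtered stream
def pvWith : List String → List String → List (List String)
  | steptext, [] => if steptext.length > 0 then [steptext] else []
  | steptext, l :: rest =>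
    if l ≠ "" then pvWith (steptext ++ [l]) rest
    else if steptext.length > 0 then steptext :: pvWith [] rest
    else pvWith steptext rest

lemma loopA_eq_with (xs : List String) : ∀ st, pvLoopA xs st =
    pvWith st ((xs.map PySem.Str.strip).filter
      (fun l => !(pvIsCommentLine l || pvIsMetadataLine l))) := by
  induction xs with
  | nil => intro st; simp [pvLoopA, pvWith]
  | cons l rest ih =>
    intro st
    simp only [List.map_cons, List.filter_cons, pvLoopA]
    by_cases h : (pvIsCommentLine (PySem.Str.strip l) || pvIsMetadataLine (PySem.Str.strip l)) = true
    · simp [h, ih]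
    · simp only [Bool.not_eq_true] at h
      by_cases he : PySem.Str.strip l = ""
      · have hc : pvIsCommentLine "" = false := by decide
        have hm : pvIsMetadataLine "" = false := by decide
        simp [he, hc, hm, pvWith, ih]
      · simp [h, he, pvWith, ih]

lemma with_eq_runs (ys : List String) :
    (∀ st, st ≠ [] → pvWith st ys =
        (st ++ ys.takeWhile (· ≠ "")) :: pvGroupRuns (ys.dropWhile (· ≠ ""))) ∧
    pvWith [] ys = pvGroupRuns ys := by
  induction ys with
  | nil => exact ⟨fun st h => by simp [pvWith, pvGroupRuns, List.length_pos_iff.mpr h], by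
      simp [pvWith, pvGroupRuns]⟩
  | cons l rest ih =>
    by_cases he : l = ""
    · subst he
      refine ⟨fun st h => ?_, ?_⟩
      · simp [pvWith, List.length_pos_iff.mpr h, ih.2, List.takeWhile, List.dropWhile,
          pvGroupRuns]
      · simp [pvWith, ih.2, pvGroupRuns]
    · refine ⟨fun st h => ?_, ?_⟩
      · have := ih.1 (st ++ [l]) (by simp)
        simp [pvWith, he, this, List.takeWhile_cons_of_pos, List.dropWhile_cons_of_pos]
      · have := ih.1 [l] (by simp)
        simp [pvWith, he, this, pvGroupRuns]

-- ===== VERDICT (by name: the statement is the Claim_ definition above) =====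
theorem group_steplines_spec : Claim_equal_group_steplines := by
  intro xs _
  unfold Spec_group_steplines group_steplines group_steplines_alt
  rw [loopA_eq_with]
  exact (with_eq_runs _).2
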